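-- pv_equiv track=rewrite | github.com/tenten-10-10/cloudlog | cloudlog/timeclock_store.py | _attendance_state_from_events
-- ===== SOURCE A (Python) =====
-- from typing import Any
--
-- EVENT_IN = "IN"
--
-- EVENT_OUT = "OUT"
--
-- EVENT_OUTING = "OUTING"
--
-- EVENT_RETURN = "RETURN"
--
-- EVENT_TYPES = {EVENT_IN, EVENT_OUT, EVENT_OUTING, EVENT_RETURN}
--
-- def _attendance_state_from_events(events: list[dict[str, Any]]) -> str:
--     timeline = sorted(
--         [ev for ev in events if str(ev.get("event_type") or "") in EVENT_TYPES],
--         key=lambda ev: str(ev.get("event_time") or ""),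
--     )
--     state = "NOT_STARTED"
--     for ev in timeline:
--         event_type = str(ev.get("event_type") or "")
--         if event_type == EVENT_IN:
--             state = "WORKING"
--         elif event_type == EVENT_OUTING and state == "WORKING":
--             state = "OUTING"
--         elif event_type == EVENT_RETURN and state == "OUTING":
--             state = "WORKING"
--         elif event_type == EVENT_OUT and state in {"WORKING", "OUTING"}:
--             state = "DONE"
--     return state
-- ===== SOURCE B (Python) =====
-- def _attendance_state_from_events(events):
--     timeline = sorted(
--         [ev for ev in events if str(ev.get("event_type") or "") in {"IN", "OUT", "OUTING", "RETURN"}],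
--         key=lambda ev: str(ev.get("event_time") or ""),
--     )
--     # Phase 1: find the last IN event; without one the state can never leave NOT_STARTED.
--     last_in = -1
--     for i, ev in enumerate(timeline):
--         if str(ev.get("event_type") or "") == "IN":
--             last_in = i
--     if last_in < 0:
--         return "NOT_STARTED"
--     # Phase 2: start WORKING at that IN and replay only the trailing OUTING/RETURN/OUT events.
--     state = "WORKING"
--     for ev in timeline[last_in + 1:]:
--         t = str(ev.get("event_type") or "")
--         if t == "OUTING" and state == "WORKING":
--             state = "OUTING"
--         elif t == "RETURN" and state == "OUTING":
--             state = "WORKING"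
--         elif t == "OUT" and state in ("WORKING", "OUTING"):
--             state = "DONE"
--     return state
-- ===== Notes on version B (the rewrite author's own statement) =====
-- stated objective: alternative
-- what changed: Replaces A's single forward fold over the whole sorted timeline with a two-phase decomposition: locate the last IN event (returning NOT_STARTED immediately if there is none) and then replay only the suffix of events after it starting from WORKING.
import Mathlib
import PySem

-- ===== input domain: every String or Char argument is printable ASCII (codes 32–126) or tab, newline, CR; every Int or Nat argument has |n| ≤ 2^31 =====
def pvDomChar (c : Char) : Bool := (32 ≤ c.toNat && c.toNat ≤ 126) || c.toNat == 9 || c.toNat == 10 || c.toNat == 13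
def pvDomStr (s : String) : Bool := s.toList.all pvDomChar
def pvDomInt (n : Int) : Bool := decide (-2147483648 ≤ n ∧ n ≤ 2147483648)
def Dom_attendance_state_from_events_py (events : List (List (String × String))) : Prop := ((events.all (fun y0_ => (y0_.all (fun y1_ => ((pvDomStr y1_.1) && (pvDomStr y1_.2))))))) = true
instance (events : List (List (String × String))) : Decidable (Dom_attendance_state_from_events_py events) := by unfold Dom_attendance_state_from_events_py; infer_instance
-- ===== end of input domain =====

-- B replaces A's single forward fold over the whole sorted timeline with a two-phase scan:
-- find the last IN event (none → NOT_STARTED), then replay only the suffix after it from WORKING;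
-- same cost, different decomposition. Equivalence proved on the full domain.


-- ===== PORT A =====
-- shared module context: str(ev.get(k) or "") — None and "" both become ""
def pvGetStr (ev : List (String × String)) (k : String) : String :=
  match (PySem.Dict.mk ev).get? k with
  | none => ""
  | some s => if s = "" then "" else s

-- EVENT_TYPES = {EVENT_IN, EVENT_OUT, EVENT_OUTING, EVENT_RETURN}
def pvEVENT_TYPES : List String := PySem.Set.ofList ["IN", "OUT", "OUTING", "RETURN"]

-- timeline = sorted([ev for ev in events if … in EVENT_TYPES], key=…event_time…)
def pvTimeline (events : List (List (String × String))) : List (List (String × String)) :=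
  PySem.List.sorted (events.filter (fun ev => pvEVENT_TYPES.contains (pvGetStr ev "event_type")))
    (fun ev => pvGetStr ev "event_time") false

def pvStepA (state : String) (ev : List (String × String)) : String :=
  let event_type := pvGetStr ev "event_type"
  if event_type = "IN" then "WORKING"
  else if event_type = "OUTING" ∧ state = "WORKING" then "OUTING"
  else if event_type = "RETURN" ∧ state = "OUTING" then "WORKING"
  else if event_type = "OUT" ∧ (state = "WORKING" ∨ state = "OUTING") then "DONE"
  else state

def attendance_state_from_events_py (events : List (List (String × String))) : String :=
  (pvTimeline events).foldl pvStepA "NOT_STARTED"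

-- ===== PORT B =====
-- phase 1: last_in loop (enumerate)
def pvLastIn (timeline : List (List (String × String))) : Int :=
  (PySem.List.enumerate timeline 0).foldl
    (fun last_in p => if pvGetStr p.2 "event_type" = "IN" then p.1 else last_in) (-1)

-- phase 2 step: the three non-IN transitions
def pvStepB (state : String) (ev : List (String × String)) : String :=
  let t := pvGetStr ev "event_type"
  if t = "OUTING" ∧ state = "WORKING" then "OUTING"
  else if t = "RETURN" ∧ state = "OUTING" then "WORKING"
  else if t = "OUT" ∧ (state = "WORKING" ∨ state = "OUTING") then "DONE"
  else state

def attendance_state_from_events_py_alt (events : List (List (String × String))) : String :=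
  let timeline := pvTimeline events
  let last_in := pvLastIn timeline
  if last_in < 0 then "NOT_STARTED"
  else (PySem.List.slice timeline (some (last_in + 1)) none).foldl pvStepB "WORKING"

-- ===== PRECONDITION & SPEC =====
def Spec_attendance_state_from_events_py (events : List (List (String × String))) (out : String) : Prop := out = attendance_state_from_events_py_alt events
instance (events : List (List (String × String))) (out : String) : Decidable (Spec_attendance_state_from_events_py events out) := by unfold Spec_attendance_state_from_events_py; infer_instance

-- ===== CLAIM (what is proved, stated in full; the proofs are below) =====
def Claim_equal_attendance_state_from_events_py : Prop := ∀ (events : List (List (String × String))), Dom_attendance_state_from_events_py events → Spec_attendance_state_from_events_py events (attendance_state_from_events_py events)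

-- ===== LEMMAS AND PROOFS =====

theorem pvLastIn_append (tl : List (List (String × String))) (e : List (String × String)) :
    pvLastIn (tl ++ [e]) =
      if pvGetStr e "event_type" = "IN" then (tl.length : Int) else pvLastIn tl := by
  simp [pvLastIn, PySem.List.enumerate_append, PySem.List.enumerate_cons, PySem.List.enumerate_nil,
    List.foldl_append]

theorem pvLastIn_bounds (tl : List (List (String × String))) :
    -1 ≤ pvLastIn tl ∧ pvLastIn tl < (tl.length : Int) := by
  induction tl using List.reverseRecOn with
  | nil => simp [pvLastIn, PySem.List.enumerate_nil]
  | append_singleton tl e ih =>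
    rw [pvLastIn_append]
    split_ifs <;> simp
    all_goals omega

theorem pvStepA_not_started (e : List (String × String))
    (h : pvGetStr e "event_type" ≠ "IN") :
    pvStepA "NOT_STARTED" e = "NOT_STARTED" := by
  simp [pvStepA, h]

theorem pvStepA_eq_stepB (s : String) (e : List (String × String))
    (h : pvGetStr e "event_type" ≠ "IN") :
    pvStepA s e = pvStepB s e := by
  simp [pvStepA, pvStepB, h]

theorem pv_main (tl : List (List (String × String))) :
    tl.foldl pvStepA "NOT_STARTED" =
      (if pvLastIn tl < 0 then "NOT_STARTED"
       else (PySem.List.slice tl (some (pvLastIn tl + 1)) none).foldl pvStepB "WORKING") := by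
  induction tl using List.reverseRecOn with
  | nil => simp [pvLastIn, PySem.List.enumerate_nil]
  | append_singleton tl e ih =>
    rw [List.foldl_append, List.foldl_cons, List.foldl_nil, pvLastIn_append]
    obtain ⟨hlo, hhi⟩ := pvLastIn_bounds tl
    by_cases hin : pvGetStr e "event_type" = "IN"
    · -- the new last element is an IN: the suffix after it is empty, final state WORKING
      rw [if_pos hin, if_neg (by omega : ¬ ((tl.length : Int) < 0))]
      have hcast : (tl.length : Int) + 1 = ((tl.length + 1 : Nat) : Int) := by push_cast; ring
      rw [hcast, PySem.List.slice_from_natCast]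
      simp [pvStepA, hin]
    · rw [if_neg hin]
      by_cases hneg : pvLastIn tl < 0
      · -- still no IN anywhere: state stays NOT_STARTED
        rw [if_pos hneg] at ih ⊢
        rw [ih, pvStepA_not_started e hin]
      · -- the pivot is unchanged; the suffix gains e at its end
        rw [if_neg hneg] at ih ⊢
        have hn : pvLastIn tl = ((pvLastIn tl).toNat : Int) := by omega
        rw [hn] at ih ⊢
        have hcast : ((pvLastIn tl).toNat : Int) + 1 = (((pvLastIn tl).toNat + 1 : Nat) : Int) := by
          push_cast; ring
        rw [hcast, PySem.List.slice_from_natCast] at ih ⊢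
        rw [List.drop_append_of_le_length (by omega), List.foldl_append, List.foldl_cons,
          List.foldl_nil, ← ih, pvStepA_eq_stepB _ e hin]

-- ===== VERDICT (by name: the statement is the Claim_ definition above) =====
theorem attendance_state_from_events_py_spec : Claim_equal_attendance_state_from_events_py := by
  intro events _
  unfold Spec_attendance_state_from_events_py attendance_state_from_events_py
    attendance_state_from_events_py_alt
  exact pv_main (pvTimeline events)
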